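-- pv_equiv track=rewrite | github.com/binchoi/study | python/05-top-leet-questions/01-easy-collection/01-arrays/valid-sudoku.py | isValidSet
-- ===== SOURCE A (Python) =====
-- from typing import List
--
-- def isValidSet(items: List[str]) -> bool:
--     seen = set()
--     for v in items:
--         if v != ".":
--             if v in seen:
--                 return False
--             else:
--                 seen.add(v)
--     return True
-- ===== SOURCE B (Python) =====
-- def isValidSet(items):
--     vals = sorted(v for v in items if v != ".")
--     return all(a != b for a, b in zip(vals, vals[1:]))
-- ===== Notes on version B (the rewrite author's own statement) =====
-- stated objective: alternative
-- what changed: Replaces the hash-set membership loop with a sort-based duplicate check: sort the non-dot items and verify no two adjacent sorted values are equal.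
import Mathlib
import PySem

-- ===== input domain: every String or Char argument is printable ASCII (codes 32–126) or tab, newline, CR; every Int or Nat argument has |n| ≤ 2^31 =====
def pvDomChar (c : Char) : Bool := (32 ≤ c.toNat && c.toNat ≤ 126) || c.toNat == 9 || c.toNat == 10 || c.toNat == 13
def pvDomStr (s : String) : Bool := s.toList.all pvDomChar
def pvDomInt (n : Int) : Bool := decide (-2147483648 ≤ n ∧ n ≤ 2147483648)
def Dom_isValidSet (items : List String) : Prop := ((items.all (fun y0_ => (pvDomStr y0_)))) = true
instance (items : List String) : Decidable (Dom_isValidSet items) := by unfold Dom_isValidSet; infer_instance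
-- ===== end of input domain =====

-- B replaces A's incremental seen-set loop by a sort-based duplicate check: sort the
-- non-dot items and verify no two adjacent sorted values are equal (objective: alternative).


-- ===== PORT A =====
-- loop over items carrying the 'seen' set, returning False on the first repeat
def isValidSetGo : List String → PySem.Set String → Bool
  | [], _ => true
  | v :: rest, seen =>
      if v ≠ "." then
        if PySem.Set.contains seen v then false
        else isValidSetGo rest (PySem.Set.add seen v)
      else isValidSetGo rest seen

def isValidSet (items : List String) : Bool :=
  isValidSetGo items PySem.Set.empty

-- ===== PORT B =====
-- vals = sorted(non-dot items); zip(vals, vals[1:]) paired with 'all a != b'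
-- (vals[1:] is vals.drop 1, exact for the step-1 tail slice)
def isValidSet_alt (items : List String) : Bool :=
  let vals := PySem.List.sorted (items.filter (fun v => v ≠ ".")) (fun x => x) false
  (vals.zip (vals.drop 1)).all (fun p => p.1 ≠ p.2)

-- ===== PRECONDITION & SPEC =====
def Spec_isValidSet (items : List String) (out : Bool) : Prop := out = isValidSet_alt items
instance (items : List String) (out : Bool) : Decidable (Spec_isValidSet items out) := by unfold Spec_isValidSet; infer_instance

-- ===== CLAIM (what is proved, stated in full; the proofs are below) =====
def Claim_equal_isValidSet : Prop := ∀ (items : List String), Dom_isValidSet items → Spec_isValidSet items (isValidSet items)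

-- ===== LEMMAS AND PROOFS =====

-- A's loop returns true iff the non-dot items are distinct and disjoint from 'seen'
theorem isValidSetGo_iff (l : List String) (seen : PySem.Set String) :
    isValidSetGo l seen = true ↔
      (l.filter (fun v => v ≠ ".")).Nodup ∧ ∀ x ∈ l.filter (fun v => v ≠ "."), x ∉ seen := by
  induction l generalizing seen with
  | nil => simp [isValidSetGo]
  | cons v rest ih =>
      by_cases hv : v = "."
      · simpa [isValidSetGo, hv] using ih seen
      · rw [show (v :: rest).filter (fun v => v ≠ ".") =
              v :: rest.filter (fun v => v ≠ ".") by simp [hv]]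
        by_cases hc : v ∈ seen
        · have hfalse : isValidSetGo (v :: rest) seen = false := by
            simp [isValidSetGo, hv, PySem.Set.contains, hc]
          simp only [hfalse, Bool.false_eq_true, false_iff, not_and]
          intro _ hdisj
          exact (hdisj v (by simp)) hc
        · have hstep : isValidSetGo (v :: rest) seen = isValidSetGo rest (PySem.Set.add seen v) := by
            simp [isValidSetGo, hv, PySem.Set.contains, hc]
          rw [hstep, ih]
          have hadd : ∀ x, x ∈ PySem.Set.add seen v ↔ x ∈ seen ∨ x = v := by
            intro x; rw [PySem.Set.mem_add]
          constructor
          · rintro ⟨hnd, hdisj⟩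
            refine ⟨List.nodup_cons.mpr ⟨fun hm => ?_, hnd⟩, ?_⟩
            · exact (hadd v).not.mp (hdisj v hm) (Or.inr rfl)
            · intro x hx
              rcases List.mem_cons.mp hx with rfl | hx
              · exact hc
              · intro hxs; exact ((hadd x).not.mp (hdisj x hx)) (Or.inl hxs)
          · rintro ⟨hnd, hdisj⟩
            have hnd' := List.nodup_cons.mp hnd
            refine ⟨hnd'.2, ?_⟩
            intro x hx hxadd
            rcases (hadd x).mp hxadd with hxs | hxv
            · exact hdisj x (List.mem_cons_of_mem _ hx) hxs
            · exact hnd'.1 (hxv ▸ hx)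

-- adjacent-distinct on a ≤-sorted list is exactly Nodup
theorem chain_ne_iff_nodup (l : List String) (hs : l.Pairwise (· ≤ ·)) :
    l.IsChain (· ≠ ·) ↔ l.Nodup := by
  constructor
  · intro hch
    induction l with
    | nil => simp
    | cons a l ih =>
        have hp := List.pairwise_cons.mp hs
        refine List.nodup_cons.mpr ⟨?_, ?_⟩
        · intro hmem
          cases l with
          | nil => cases hmem
          | cons h t =>
              have hah : a ≠ h := (List.isChain_cons_cons.mp hch).1
              rcases List.mem_cons.mp hmem with rfl | hmt
              · exact hah rfl
              · have hle_h : a ≤ h := hp.1 h (by simp)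
                have hle : h ≤ a := (List.pairwise_cons.mp hp.2).1 a hmt
                exact hah (le_antisymm hle_h hle)
        · cases l with
          | nil => simp
          | cons h t => exact ih hp.2 (List.isChain_cons_cons.mp hch).2
  · intro hnd
    exact List.Pairwise.isChain (hnd.imp fun h => h)

-- zip-with-tail 'all distinct' is IsChain (≠)
theorem zip_tail_all_ne (l : List String) :
    ((l.zip (l.drop 1)).all (fun p => p.1 ≠ p.2)) = true ↔ l.IsChain (· ≠ ·) := by
  induction l with
  | nil => simp
  | cons a l ih =>
      cases l with
      | nil => simp
      | cons b t =>
          rw [List.isChain_cons_cons, ← ih]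
          simp

-- ===== VERDICT (by name: the statement is the Claim_ definition above) =====
theorem isValidSet_spec : Claim_equal_isValidSet := by
  intro items _
  unfold Spec_isValidSet isValidSet isValidSet_alt
  rw [Bool.eq_iff_iff, isValidSetGo_iff, zip_tail_all_ne,
    chain_ne_iff_nodup _ (PySem.List.sorted_pairwise (items.filter (fun v => v ≠ ".")) (fun x => x))]
  have hperm := PySem.List.sorted_perm (items.filter (fun v => v ≠ ".")) (fun x => x) false
  rw [hperm.nodup_iff]
  simp [PySem.Set.empty]
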